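-- pv_equiv track=rewrite | github.com/juanfraitu1/Rustle | scripts/diagnose_absent_full_junction.py | chain_match
-- ===== SOURCE A (Python) =====
-- from typing import Dict, List, Set, Tuple
--
-- def chain_match(
--     ref_i: List[Tuple[int, int]],
--     qry_i: List[Tuple[int, int]],
--     tol: int,
-- ) -> str:
--     """exact | fuzzy | len_mismatch | incompatible"""
--     if len(ref_i) != len(qry_i):
--         return "len_mismatch"
--     if not ref_i:
--         return "exact" if len(qry_i) == 0 else "len_mismatch"
--     for (a, b), (c, d) in zip(ref_i, qry_i):
--         if abs(a - c) > tol or abs(b - d) > tol: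
--             return "incompatible"
--     exact = all(
--         abs(a - c) == 0 and abs(b - d) == 0 for (a, b), (c, d) in zip(ref_i, qry_i)
--     )
--     return "exact" if exact else "fuzzy"
-- ===== SOURCE B (Python) =====
-- def chain_match(ref_i, qry_i, tol):
--     """exact | fuzzy | len_mismatch | incompatible"""
--     if len(ref_i) != len(qry_i):
--         return "len_mismatch"
--     if not ref_i:
--         return "exact"
--     m = 0
--     for (a, b), (c, d) in zip(ref_i, qry_i):
--         m = max(m, abs(a - c), abs(b - d))
--     if m > tol:
--         return "incompatible"
--     return "exact" if m == 0 else "fuzzy"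
-- ===== Notes on version B (the rewrite author's own statement) =====
-- stated objective: simpler
-- what changed: Replaces A's early-exit tolerance loop plus a second all()-equality scan over the zipped pairs with one reduction computing the maximum deviation m, classifying once afterwards (incompatible if m > tol, exact if m == 0, fuzzy otherwise).
import Mathlib
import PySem

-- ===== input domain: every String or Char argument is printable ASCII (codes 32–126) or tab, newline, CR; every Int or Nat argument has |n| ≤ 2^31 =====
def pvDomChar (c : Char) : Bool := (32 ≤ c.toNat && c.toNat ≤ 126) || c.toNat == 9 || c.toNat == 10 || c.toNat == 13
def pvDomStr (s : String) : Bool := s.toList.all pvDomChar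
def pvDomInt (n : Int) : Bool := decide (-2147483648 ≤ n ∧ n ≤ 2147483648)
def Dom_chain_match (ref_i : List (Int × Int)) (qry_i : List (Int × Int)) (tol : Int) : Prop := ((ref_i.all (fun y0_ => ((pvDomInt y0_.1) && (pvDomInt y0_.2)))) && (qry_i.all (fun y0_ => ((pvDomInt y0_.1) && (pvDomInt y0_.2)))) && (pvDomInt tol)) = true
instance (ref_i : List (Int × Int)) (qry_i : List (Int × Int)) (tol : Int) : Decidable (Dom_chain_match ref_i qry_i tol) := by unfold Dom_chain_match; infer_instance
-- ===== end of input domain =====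

-- B replaces A's early-exit tolerance loop + separate all()-equality scan by a single
-- max-deviation reduction followed by one classification (objective: simpler).

-- ===== PORT A =====
-- A's for-loop with its early `return "incompatible"`
def chainLoopA (tol : Int) : List ((Int × Int) × (Int × Int)) → Option String
  | [] => none
  | (p, q) :: rest =>
    if |p.1 - q.1| > tol ∨ |p.2 - q.2| > tol then some "incompatible"
    else chainLoopA tol rest

def chain_match (ref_i : List (Int × Int)) (qry_i : List (Int × Int)) (tol : Int) : String :=
  if ref_i.length ≠ qry_i.length then "len_mismatch"
  else if ref_i = [] then (if qry_i.length = 0 then "exact" else "len_mismatch")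
  else
    match chainLoopA tol (ref_i.zip qry_i) with
    | some s => s
    | none =>
      let exact := (ref_i.zip qry_i).all (fun pq => decide (|pq.1.1 - pq.2.1| = 0 ∧ |pq.1.2 - pq.2.2| = 0))
      if exact then "exact" else "fuzzy"

-- ===== PORT B =====
def chain_match_alt (ref_i : List (Int × Int)) (qry_i : List (Int × Int)) (tol : Int) : String :=
  if ref_i.length ≠ qry_i.length then "len_mismatch"
  else if ref_i = [] then "exact"
  else
    let m := (ref_i.zip qry_i).foldl (fun m pq => max (max m |pq.1.1 - pq.2.1|) |pq.1.2 - pq.2.2|) 0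
    if m > tol then "incompatible"
    else if m = 0 then "exact" else "fuzzy"

-- ===== PRECONDITION & SPEC =====
def Spec_chain_match (ref_i : List (Int × Int)) (qry_i : List (Int × Int)) (tol : Int) (out : String) : Prop := out = chain_match_alt ref_i qry_i tol
instance (ref_i : List (Int × Int)) (qry_i : List (Int × Int)) (tol : Int) (out : String) : Decidable (Spec_chain_match ref_i qry_i tol out) := by unfold Spec_chain_match; infer_instance

-- ===== CLAIM (what is proved, stated in full; the proofs are below) =====
def Claim_equal_chain_match : Prop := ∀ (ref_i : List (Int × Int)) (qry_i : List (Int × Int)) (tol : Int), Dom_chain_match ref_i qry_i tol → Spec_chain_match ref_i qry_i tol (chain_match ref_i qry_i tol)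

-- ===== LEMMAS AND PROOFS =====

def devMax (l : List ((Int × Int) × (Int × Int))) : Int :=
  l.foldl (fun m pq => max (max m |pq.1.1 - pq.2.1|) |pq.1.2 - pq.2.2|) 0

theorem foldl_devMax (l : List ((Int × Int) × (Int × Int))) (acc : Int) (hacc : 0 ≤ acc) :
    l.foldl (fun m pq => max (max m |pq.1.1 - pq.2.1|) |pq.1.2 - pq.2.2|) acc = max acc (devMax l) := by
  induction l generalizing acc with
  | nil => simp [devMax]; omega
  | cons p rest ih =>
    simp only [devMax, List.foldl_cons]
    have hx := abs_nonneg (p.1.1 - p.2.1)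
    have hy := abs_nonneg (p.1.2 - p.2.2)
    rw [ih _ (by omega), ih (max (max 0 |p.1.1 - p.2.1|) |p.1.2 - p.2.2|) (by omega)]
    omega

theorem devMax_cons (p : (Int × Int) × (Int × Int)) (l : List ((Int × Int) × (Int × Int))) :
    devMax (p :: l) = max (max |p.1.1 - p.2.1| |p.1.2 - p.2.2|) (devMax l) := by
  have h : devMax (p :: l) =
      l.foldl (fun m pq => max (max m |pq.1.1 - pq.2.1|) |pq.1.2 - pq.2.2|)
        (max (max 0 |p.1.1 - p.2.1|) |p.1.2 - p.2.2|) := rfl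
  have hx := abs_nonneg (p.1.1 - p.2.1)
  have hy := abs_nonneg (p.1.2 - p.2.2)
  rw [h, foldl_devMax _ _ (by omega)]
  omega

theorem devMax_nonneg (l : List ((Int × Int) × (Int × Int))) : 0 ≤ devMax l := by
  induction l with
  | nil => simp [devMax]
  | cons p rest ih => rw [devMax_cons]; have := abs_nonneg (p.1.1 - p.2.1); omega

theorem chainLoopA_eq (tol : Int) (l : List ((Int × Int) × (Int × Int))) (hne : l ≠ []) :
    chainLoopA tol l = if devMax l > tol then some "incompatible" else none := by
  induction l with
  | nil => exact absurd rfl hne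
  | cons p rest ih =>
    rw [devMax_cons]
    have hx := abs_nonneg (p.1.1 - p.2.1)
    have hy := abs_nonneg (p.1.2 - p.2.2)
    have hr := devMax_nonneg rest
    by_cases hd : |p.1.1 - p.2.1| > tol ∨ |p.1.2 - p.2.2| > tol
    · rw [show chainLoopA tol (p :: rest) = some "incompatible" by
        simp only [chainLoopA, if_pos hd]]
      rw [if_pos (by rcases hd with h | h <;> omega)]
    · push Not at hd
      rw [show chainLoopA tol (p :: rest) = chainLoopA tol rest by
        simp only [chainLoopA]
        rw [if_neg (by push Not; exact hd)]]
      cases rest with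
      | nil =>
        simp only [chainLoopA]
        rw [if_neg (by simp only [devMax, List.foldl_nil]; omega)]
      | cons q rest' =>
        rw [ih (by simp)]
        rw [devMax_cons]
        have hq := devMax_nonneg rest'
        split_ifs <;> first | rfl | omega

theorem all_eq_devMax_zero (l : List ((Int × Int) × (Int × Int))) :
    (l.all (fun pq => decide (|pq.1.1 - pq.2.1| = 0 ∧ |pq.1.2 - pq.2.2| = 0))) =
      decide (devMax l = 0) := by
  induction l with
  | nil => simp [devMax]
  | cons p rest ih =>
    rw [List.all_cons, ih]
    have hx := abs_nonneg (p.1.1 - p.2.1)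
    have hy := abs_nonneg (p.1.2 - p.2.2)
    have hr := devMax_nonneg rest
    have hc := devMax_cons p rest
    by_cases h0 : devMax (p :: rest) = 0
    · rw [decide_eq_true h0, decide_eq_true (by omega : |p.1.1 - p.2.1| = 0 ∧ |p.1.2 - p.2.2| = 0),
        decide_eq_true (by omega : devMax rest = 0)]
      rfl
    · rw [decide_eq_false h0]
      by_cases hp : |p.1.1 - p.2.1| = 0 ∧ |p.1.2 - p.2.2| = 0
      · rw [decide_eq_true hp, decide_eq_false (by omega : ¬ devMax rest = 0)]
        rfl
      · rw [decide_eq_false hp]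
        rfl

-- B's result characterised through devMax (definitionally equal to its foldl)
theorem alt_eq (ref_i qry_i : List (Int × Int)) (tol : Int) :
    chain_match_alt ref_i qry_i tol =
      if ref_i.length ≠ qry_i.length then "len_mismatch"
      else if ref_i = [] then "exact"
      else if devMax (ref_i.zip qry_i) > tol then "incompatible"
      else if devMax (ref_i.zip qry_i) = 0 then "exact" else "fuzzy" := rfl

-- ===== VERDICT (by name: the statement is the Claim_ definition above) =====
theorem chain_match_spec : Claim_equal_chain_match := by
  intro ref_i qry_i tol _
  unfold Spec_chain_match chain_match
  rw [alt_eq]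
  by_cases hlen : ref_i.length ≠ qry_i.length
  · rw [if_pos hlen, if_pos hlen]
  · rw [if_neg hlen, if_neg hlen]
    by_cases hnil : ref_i = []
    · have hq : qry_i.length = 0 := by
        subst hnil; simp at hlen; omega
      rw [if_pos hnil, if_pos hnil, if_pos hq]
    · rw [if_neg hnil, if_neg hnil]
      have hzne : ref_i.zip qry_i ≠ [] := by
        cases ref_i with
        | nil => exact absurd rfl hnil
        | cons r rs =>
          cases qry_i with
          | nil => simp at hlen
          | cons q qs => simp [List.zip]
      rw [chainLoopA_eq tol _ hzne, all_eq_devMax_zero]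
      by_cases h1 : devMax (ref_i.zip qry_i) > tol
      · rw [if_pos h1, if_pos h1]
      · rw [if_neg h1, if_neg h1]
        by_cases h0 : devMax (ref_i.zip qry_i) = 0
        · simp [h0]
        · simp [h0]
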